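-- pv_equiv track=rewrite | github.com/pypi-data/pypi-mirror-403 | packages/openapi-ts-client/openapi_ts_client-1.4.0.tar.gz/openapi_ts_client-1.4.0/src/openapi_ts_client/generators/fetch/models.py | _enum_key_name
-- ===== SOURCE A (Python) =====
-- def _enum_key_name(value: str) -> str:
--     """Convert an enum value to a valid TypeScript identifier.
--
--     Examples:
--         '.' -> 'Period'
--         'X' -> 'X'
--         'available' -> 'Available'
--         'in-progress' -> 'InProgress'
--     """
--     # Special case for common symbols
--     special_chars = {
--         ".": "Period",
--         "-": "Dash",
--         "_": "Underscore",
--         " ": "Space",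
--         "/": "Slash",
--         "\\": "Backslash",
--         "+": "Plus",
--         "*": "Star",
--         "?": "Question",
--         "!": "Exclamation",
--         "@": "At",
--         "#": "Hash",
--         "$": "Dollar",
--         "%": "Percent",
--         "^": "Caret",
--         "&": "Ampersand",
--         "=": "Equals",
--         "<": "LessThan",
--         ">": "GreaterThan",
--         "|": "Pipe",
--         "~": "Tilde",
--         "`": "Backtick",
--     }
--
--     if value in special_chars:
--         return special_chars[value]
--
--     # If value starts with a digit, prefix with underscore
--     if value and value[0].isdigit():
--         value = "_" + value
--
--     # Convert kebab-case or snake_case to PascalCase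
--     result = ""
--     capitalize_next = True
--     for char in value:
--         if char in ("-", "_", " "):
--             capitalize_next = True
--         elif char in special_chars:
--             result += special_chars[char]
--             capitalize_next = True
--         elif capitalize_next:
--             result += char.upper()
--             capitalize_next = False
--         else:
--             result += char
--
--     return result if result else value
-- ===== SOURCE B (Python) =====
-- # Stateless per-position rewrite: each output piece depends only on (prev char, char);
-- # special chars looked up by scanning parallel key/name sequences instead of a dict.
-- _SPEC_KEYS = ".-_ /\\+*?!@#$%^&=<>|~`"
-- _SPEC_NAMES = ("Period", "Dash", "Underscore", "Space", "Slash", "Backslash",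
--                "Plus", "Star", "Question", "Exclamation", "At", "Hash",
--                "Dollar", "Percent", "Caret", "Ampersand", "Equals",
--                "LessThan", "GreaterThan", "Pipe", "Tilde", "Backtick")
--
--
-- def _special(ch):
--     for k, name in zip(_SPEC_KEYS, _SPEC_NAMES):
--         if k == ch:
--             return name
--     return None
--
--
-- def _piece(prev, ch):
--     if ch in "-_ ":
--         return ""
--     s = _special(ch)
--     if s is not None:
--         return s
--     # capitalize exactly at a word boundary: start of string or right after a
--     # special char (the separators -, _, space are themselves special)
--     if prev is None or _special(prev) is not None:
--         return ch.upper()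
--     return ch
--
--
-- def _enum_key_name(value: str) -> str:
--     if len(value) == 1 and _special(value) is not None:
--         return _special(value)
--     if value and value[0].isdigit():
--         value = "_" + value
--     result = "".join(_piece(p, c) for p, c in zip((None,) + tuple(value), value))
--     return result if result else value
-- ===== Notes on version B (the rewrite author's own statement) =====
-- stated objective: alternative
-- what changed: Replaced A's dict-driven loop with a mutable capitalize_next flag by a stateless per-position map: each output piece is computed from (previous char, char) alone and the pieces are joined; the special-char table becomes a scan over parallel key/name sequences instead of a dict.
import Mathlib
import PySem

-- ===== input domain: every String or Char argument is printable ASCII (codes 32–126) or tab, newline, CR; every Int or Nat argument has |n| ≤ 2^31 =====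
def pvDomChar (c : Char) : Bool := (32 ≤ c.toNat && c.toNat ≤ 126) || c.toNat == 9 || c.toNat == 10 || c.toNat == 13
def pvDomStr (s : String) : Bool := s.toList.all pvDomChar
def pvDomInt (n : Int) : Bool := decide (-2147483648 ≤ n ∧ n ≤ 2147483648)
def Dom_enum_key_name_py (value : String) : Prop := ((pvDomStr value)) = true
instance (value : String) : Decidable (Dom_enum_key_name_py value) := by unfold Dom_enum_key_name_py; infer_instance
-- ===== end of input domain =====

-- B replaces A's stateful capitalize_next loop by a stateless per-position map over
-- (previous char, char) pairs, with the special table as parallel key/name sequences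
-- (objective: alternative decomposition, same cost).

-- ===== PORT A =====
-- A's module-level special_chars dict
def pvSpecials : PySem.Dict (List Char) (List Char) :=
  PySem.Dict.mk [(".".toList, "Period".toList), ("-".toList, "Dash".toList),
    ("_".toList, "Underscore".toList), (" ".toList, "Space".toList),
    ("/".toList, "Slash".toList), ("\\".toList, "Backslash".toList),
    ("+".toList, "Plus".toList), ("*".toList, "Star".toList),
    ("?".toList, "Question".toList), ("!".toList, "Exclamation".toList),
    ("@".toList, "At".toList), ("#".toList, "Hash".toList),
    ("$".toList, "Dollar".toList), ("%".toList, "Percent".toList),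
    ("^".toList, "Caret".toList), ("&".toList, "Ampersand".toList),
    ("=".toList, "Equals".toList), ("<".toList, "LessThan".toList),
    (">".toList, "GreaterThan".toList), ("|".toList, "Pipe".toList),
    ("~".toList, "Tilde".toList), ("`".toList, "Backtick".toList)]

def pvSep (c : Char) : Bool := c == '-' || c == '_' || c == ' '

def pvSpecial? (c : Char) : Option (List Char) := pvSpecials.get? [c]

-- A's loop body: state (result, capitalize_next)
def pvStepA (st : List Char × Bool) (c : Char) : List Char × Bool :=
  if pvSep c then (st.1, true)
  else match pvSpecial? c with
    | some s => (st.1 ++ s, true)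
    | none => if st.2 then (st.1 ++ [PySem.Chars.upperChar c], false) else (st.1 ++ [c], st.2)

def enum_key_name_py (value : String) : String :=
  match pvSpecials.get? value.toList with
  | some s => String.mk s
  | none =>
    let v := match value.toList with
      | c :: _ => if PySem.Chars.isdigit c then '_' :: value.toList else value.toList
      | [] => value.toList
    let result := (v.foldl pvStepA ([], true)).1
    if result = [] then String.mk v else String.mk result

-- ===== PORT B =====
-- Source B's parallel sequences _SPEC_KEYS / _SPEC_NAMES, zipped as in its loop
def pvPairsB : List (Char × List Char) :=
  (".-_ /\\+*?!@#$%^&=<>|~`".toList).zip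
    (["Period", "Dash", "Underscore", "Space", "Slash", "Backslash",
      "Plus", "Star", "Question", "Exclamation", "At", "Hash",
      "Dollar", "Percent", "Caret", "Ampersand", "Equals",
      "LessThan", "GreaterThan", "Pipe", "Tilde", "Backtick"].map String.toList)

-- _special: the for-loop over the zipped pairs with early return
def pvSpecialB : List (Char × List Char) → Char → Option (List Char)
  | [], _ => none
  | (k, name) :: rest, c => if k == c then some name else pvSpecialB rest c

def pvSepsB : List Char := "-_ ".toList

-- _piece(prev, ch)
def pvPieceB (prev : Option Char) (c : Char) : List Char :=
  if PySem.Chars.isIn [c] pvSepsB then []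
  else match pvSpecialB pvPairsB c with
    | some s => s
    | none =>
      if (match prev with | none => true | some p => (pvSpecialB pvPairsB p).isSome)
      then [PySem.Chars.upperChar c] else [c]

-- 'len(value) == 1 and _special(value) is not None' with the looked-up name
def pvSingleSpecialB (v : List Char) : Option (List Char) :=
  match v with
  | [c] => pvSpecialB pvPairsB c
  | _ => none

def enum_key_name_py_alt (value : String) : String :=
  match pvSingleSpecialB value.toList with
  | some s => String.mk s
  | none =>
    let v := match value.toList with
      | c :: rest => if PySem.Chars.isdigit c then '_' :: c :: rest else c :: rest
      | [] => []
    let result := PySem.Chars.join []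
      (((none :: v.map some).zip v).map (fun pc => pvPieceB pc.1 pc.2))
    if result = [] then String.mk v else String.mk result

-- ===== PRECONDITION & SPEC =====
def Spec_enum_key_name_py (value : String) (out : String) : Prop := out = enum_key_name_py_alt value
instance (value : String) (out : String) : Decidable (Spec_enum_key_name_py value out) := by unfold Spec_enum_key_name_py; infer_instance

-- ===== CLAIM (what is proved, stated in full; the proofs are below) =====
def Claim_equal_enum_key_name_py : Prop := ∀ (value : String), Dom_enum_key_name_py value → Spec_enum_key_name_py value (enum_key_name_py value)

-- ===== LEMMAS AND PROOFS =====

-- A's loop, rewritten as structural recursion producing the output suffix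
def pvOut : List Char → Bool → List Char
  | [], _ => []
  | c :: rest, cap =>
    if pvSep c then pvOut rest true
    else match pvSpecial? c with
      | some s => s ++ pvOut rest true
      | none => (if cap then [PySem.Chars.upperChar c] else [c]) ++ pvOut rest false

theorem pvFoldA_eq (l : List Char) : ∀ (r : List Char) (cap : Bool),
    (l.foldl pvStepA (r, cap)).1 = r ++ pvOut l cap := by
  induction l with
  | nil => intro r cap; simp [pvOut]
  | cons c rest ih =>
    intro r cap
    simp only [List.foldl_cons, pvStepA, pvOut]
    by_cases hs : pvSep c
    · simp [hs, ih]
    · simp only [hs]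
      cases h : pvSpecial? c with
      | some s => simp [h, ih]
      | none =>
        cases cap with
        | true => simp [h, ih]
        | false => simp [h, ih]

-- A's dict, all keys singletons, agrees with B's scan over the pairs
theorem pvDict_eq_scan (l : List (Char × List Char)) (q : List Char) :
    (PySem.Dict.mk (l.map fun kv => ([kv.1], kv.2))).get? q
      = (match q with | [c] => pvSpecialB l c | _ => none) := by
  induction l with
  | nil =>
    cases q with
    | nil => rfl
    | cons c t => cases t <;> rfl
  | cons kv rest ih =>
    obtain ⟨k, name⟩ := kv
    rw [List.map_cons, PySem.Dict.get?_mk_cons, ih]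
    cases q with
    | nil => simp
    | cons c t =>
      cases t with
      | nil =>
        simp only [pvSpecialB]
        by_cases h : k = c
        · simp [h]
        · simp [h]
      | cons d t' => simp

theorem pvSpecials_eq : pvSpecials = PySem.Dict.mk (pvPairsB.map fun kv => ([kv.1], kv.2)) := by
  decide

theorem pvSpecial?_eq (c : Char) : pvSpecial? c = pvSpecialB pvPairsB c := by
  rw [pvSpecial?, pvSpecials_eq, pvDict_eq_scan]

theorem pvWholeLookup (v : List Char) : pvSpecials.get? v = pvSingleSpecialB v := by
  rw [pvSpecials_eq, pvDict_eq_scan]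
  cases v with
  | nil => rfl
  | cons c t => cases t <;> rfl

theorem pvSepB_eq (c : Char) : PySem.Chars.isIn [c] pvSepsB = pvSep c := by
  have hlist : pvSepsB = ['-', '_', ' '] := by decide
  rw [Bool.eq_iff_iff, PySem.Chars.isIn_iff_infix, hlist]
  constructor
  · intro h
    have hm : c ∈ ['-', '_', ' '] := List.singleton_sublist.mp h.sublist
    simp only [List.mem_cons, List.not_mem_nil, or_false] at hm
    rcases hm with h | h | h <;> simp [pvSep, h]
  · intro h
    have hm : c ∈ ['-', '_', ' '] := by
      simp only [pvSep, Bool.or_eq_true, beq_iff_eq] at h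
      rcases h with (h | h) | h <;> simp [h]
    obtain ⟨s, t, he⟩ := List.append_of_mem hm
    exact ⟨s, t, by rw [he]; simp⟩

-- separators are themselves special (so A's two true-setting branches collapse)
theorem pvSep_special (c : Char) (h : pvSep c = true) : (pvSpecial? c).isSome = true := by
  simp only [pvSep, Bool.or_eq_true, beq_iff_eq] at h
  rcases h with (h | h) | h <;> subst h <;> decide

-- the capitalize flag A carries equals this function of the previous char
def pvCapB : Option Char → Bool
  | none => true
  | some p => (pvSpecial? p).isSome

theorem pvOut_eq_zip (v : List Char) : ∀ (prev : Option Char),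
    pvOut v (pvCapB prev)
      = ((((prev :: v.map some).zip v).map (fun pc => pvPieceB pc.1 pc.2))).flatten := by
  induction v with
  | nil => intro prev; simp [pvOut]
  | cons c t ih =>
    intro prev
    have hzip : (prev :: (c :: t).map some).zip (c :: t)
        = (prev, c) :: ((some c :: t.map some).zip t) := by simp
    rw [hzip, List.map_cons, List.flatten_cons]
    by_cases hs : pvSep c
    · have hsp := pvSep_special c hs
      have hpiece : pvPieceB prev c = [] := by simp [pvPieceB, pvSepB_eq, hs]
      have hout : pvOut (c :: t) (pvCapB prev) = pvOut t true := by simp [pvOut, hs]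
      have hcap : pvCapB (some c) = true := by simp [pvCapB, hsp]
      rw [hout, hpiece, ← hcap, ih (some c)]; simp
    · cases h : pvSpecial? c with
      | some s =>
        have hpiece : pvPieceB prev c = s := by
          simp [pvPieceB, pvSepB_eq, hs, ← pvSpecial?_eq, h]
        have hout : pvOut (c :: t) (pvCapB prev) = s ++ pvOut t true := by
          simp [pvOut, hs, h]
        have hcap : pvCapB (some c) = true := by simp [pvCapB, h]
        rw [hout, hpiece, ← hcap, ih (some c)]
      | none =>
        have hpiece : pvPieceB prev c
            = (if pvCapB prev then [PySem.Chars.upperChar c] else [c]) := by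
          cases prev with
          | none => simp [pvPieceB, pvSepB_eq, hs, ← pvSpecial?_eq, h, pvCapB]
          | some p => simp [pvPieceB, pvSepB_eq, hs, ← pvSpecial?_eq, h, pvCapB]
        have hout : pvOut (c :: t) (pvCapB prev)
            = (if pvCapB prev then [PySem.Chars.upperChar c] else [c]) ++ pvOut t false := by
          simp [pvOut, hs, h]
        have hcap : pvCapB (some c) = false := by simp [pvCapB, h]
        rw [hout, hpiece, ← hcap, ih (some c)]

theorem pvJoinNil : ∀ (ts : List (List Char)), PySem.Chars.join [] ts = ts.flatten
  | [] => by simp [PySem.Chars.join_nil]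
  | [p] => by simp [PySem.Chars.join_singleton]
  | p :: q :: rest => by
      rw [PySem.Chars.join_cons_cons, pvJoinNil (q :: rest)]; simp

-- ===== VERDICT (by name: the statement is the Claim_ definition above) =====
theorem enum_key_name_py_spec : Claim_equal_enum_key_name_py := by
  intro value _
  unfold Spec_enum_key_name_py enum_key_name_py enum_key_name_py_alt
  rw [pvWholeLookup]
  cases h : pvSingleSpecialB value.toList with
  | some s => rfl
  | none =>
    simp only
    have hv : (match value.toList with
        | c :: _ => if PySem.Chars.isdigit c then '_' :: value.toList else value.toList
        | [] => value.toList)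
        = (match value.toList with
        | c :: rest => if PySem.Chars.isdigit c then '_' :: c :: rest else c :: rest
        | [] => []) := by
      cases value.toList <;> rfl
    rw [hv]
    have := pvOut_eq_zip (match value.toList with
        | c :: rest => if PySem.Chars.isdigit c then '_' :: c :: rest else c :: rest
        | [] => []) none
    rw [pvFoldA_eq, List.nil_append, pvJoinNil]
    simp only [pvCapB] at this
    rw [this]
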